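-- pv_equiv track=rewrite | github.com/pypi-data/pypi-mirror-370 | packages/lexer-fdfattor-2025/lexer_fdfattor_2025-1.0.1.tar.gz/lexer_fdfattor_2025-1.0.1/lexer/core.py | afd_int
-- ===== SOURCE A (Python) =====
-- ESTADO_FINAL = "ESTADO FINAL"
--
-- ESTADO_NO_FINAL = "NO ACEPTADO"
--
-- ESTADO_TRAMPA = "EN ESTADO TRAMPA"
--
-- def afd_int(lexema):
--     estado = 0
--     estados_finales = [3]
--     for c in lexema:
--         if estado == 0 and c == 'i':
--             estado = 1
--         elif estado == 1 and c == 'n':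
--             estado = 2
--         elif estado == 2 and c == 't':
--             estado = 3
--         else:
--             estado = -1
--
--     if estado == -1:
--         return ESTADO_TRAMPA
--     if estado in estados_finales:
--         return ESTADO_FINAL
--     else:
--         return ESTADO_NO_FINAL
-- ===== SOURCE B (Python) =====
-- ESTADO_FINAL = "ESTADO FINAL"
--
-- ESTADO_NO_FINAL = "NO ACEPTADO"
--
-- ESTADO_TRAMPA = "EN ESTADO TRAMPA"
--
-- def afd_int(lexema):
--     chars = list(lexema)
--     if chars == ['i', 'n', 't']:
--         return ESTADO_FINAL
--     if chars in ([], ['i'], ['i', 'n']):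
--         return ESTADO_NO_FINAL
--     return ESTADO_TRAMPA
-- ===== Notes on version B (the rewrite author's own statement) =====
-- stated objective: simpler
-- what changed: Replaced the streaming DFA state loop with a single whole-input classification: compare the character list against the accepted word and its proper prefixes.
import Mathlib
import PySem

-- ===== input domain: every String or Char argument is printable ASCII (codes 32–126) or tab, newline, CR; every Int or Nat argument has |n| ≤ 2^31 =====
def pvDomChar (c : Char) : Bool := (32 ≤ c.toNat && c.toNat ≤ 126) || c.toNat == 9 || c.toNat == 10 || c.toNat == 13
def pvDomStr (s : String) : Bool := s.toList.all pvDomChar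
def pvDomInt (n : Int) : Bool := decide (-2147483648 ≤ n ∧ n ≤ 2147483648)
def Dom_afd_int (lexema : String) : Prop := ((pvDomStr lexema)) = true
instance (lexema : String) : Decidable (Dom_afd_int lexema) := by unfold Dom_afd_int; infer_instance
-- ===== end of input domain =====

-- B replaces A's streaming DFA loop with a single whole-input comparison against
-- "int" and its proper prefixes (objective: simpler).

-- ===== PORT A =====
def afdIntStep (estado : Int) (c : Char) : Int :=
  if estado = 0 ∧ c = 'i' then 1
  else if estado = 1 ∧ c = 'n' then 2
  else if estado = 2 ∧ c = 't' then 3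
  else -1

def afd_int (lexema : String) : String :=
  let estado : Int := 0
  let estados_finales : List Int := [3]
  let estado := lexema.toList.foldl afdIntStep estado
  if estado = -1 then "EN ESTADO TRAMPA"
  else if estado ∈ estados_finales then "ESTADO FINAL"
  else "NO ACEPTADO"

-- ===== PORT B =====
def afd_int_alt (lexema : String) : String :=
  let chars := lexema.toList
  if chars = ['i', 'n', 't'] then "ESTADO FINAL"
  else if chars = [] ∨ chars = ['i'] ∨ chars = ['i', 'n'] then "NO ACEPTADO"
  else "EN ESTADO TRAMPA"

-- ===== PRECONDITION & SPEC =====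
def Spec_afd_int (lexema : String) (out : String) : Prop := out = afd_int_alt lexema
instance (lexema : String) (out : String) : Decidable (Spec_afd_int lexema out) := by unfold Spec_afd_int; infer_instance

-- ===== CLAIM (what is proved, stated in full; the proofs are below) =====
def Claim_equal_afd_int : Prop := ∀ (lexema : String), Dom_afd_int lexema → Spec_afd_int lexema (afd_int lexema)

-- ===== LEMMAS AND PROOFS =====

theorem afdIntStep_trap : ∀ (l : List Char), l.foldl afdIntStep (-1) = -1 := by
  intro l
  induction l with
  | nil => rfl
  | cons c t ih => simpa [afdIntStep] using ih

theorem afdIntStep_three : ∀ (l : List Char), l ≠ [] → l.foldl afdIntStep 3 = -1 := by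
  intro l h
  cases l with
  | nil => exact absurd rfl h
  | cons c t => simpa [afdIntStep] using afdIntStep_trap t

theorem afd_int_fold_char :
    ∀ (l : List Char),
      l.foldl afdIntStep 0 =
        (if l = ['i', 'n', 't'] then 3
         else if l = [] then 0
         else if l = ['i'] then 1
         else if l = ['i', 'n'] then 2
         else -1) := by
  intro l
  match l with
  | [] => rfl
  | [c] =>
    by_cases h : c = 'i' <;> simp [afdIntStep, h]
  | [c, d] =>
    by_cases h : c = 'i' <;> by_cases h2 : d = 'n' <;> simp [afdIntStep, h, h2]
  | c :: d :: e :: rest =>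
    by_cases h : c = 'i'
    · by_cases h2 : d = 'n'
      · by_cases h3 : e = 't'
        · subst h h2 h3
          cases rest with
          | nil => rfl
          | cons f t =>
            have := afdIntStep_three (f :: t) (by simp)
            simp [afdIntStep] at this ⊢
            simp [this]
        · have := afdIntStep_trap rest
          subst h h2
          simp [afdIntStep, h3, this]
      · have := afdIntStep_trap (e :: rest)
        subst h
        simp [afdIntStep, h2, this]
    · have := afdIntStep_trap (d :: e :: rest)
      simp [afdIntStep, h] at this ⊢
      simp [this]

-- ===== VERDICT (by name: the statement is the Claim_ definition above) =====
theorem afd_int_spec : Claim_equal_afd_int := by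
  intro lexema _
  unfold Spec_afd_int afd_int afd_int_alt
  dsimp only
  rw [afd_int_fold_char]
  rcases lexema.toList with _ | ⟨c, t⟩ <;> split_ifs <;> simp_all <;> tauto
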